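-- pv_equiv track=rewrite | github.com/Gamolt/pbwtw | pbwt_wildcards.py | search_first_block
-- ===== SOURCE A (Python) =====
-- def search_first_block(a, d, j):
--     block = []
--
--     i = 0
--     x,y = ([] for i in range(2))
--     for r in range(1,len(d)):
--
--         if d[r] == j and r != 1 and r != len(d)-1:
--             block.append((a[i:r], d[r-1], j))
--             i=r
--
--         if r == len(d)-1:
--             block.append((a[i:r+1], d[r-1], j))
--
--     return block
-- ===== SOURCE B (Python) =====
-- def search_first_block(a, d, j):
--     # Recursive per-block decomposition: find the next divergence marker,
--     # emit the block up to it, recurse from there; tail block when none is left.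
--     n = len(d)
--     if n < 2:
--         return []
--
--     def go(i):
--         for r in range(max(i + 1, 2), n - 1):
--             if d[r] == j:
--                 return [(a[i:r], d[r - 1], j)] + go(r)
--         return [(a[i:n], d[n - 2], j)]
--
--     return go(0)
-- ===== Notes on version B (the rewrite author's own statement) =====
-- stated objective: alternative
-- what changed: B replaces A's single accumulator loop over every index with a recursive per-block decomposition: find the next divergence marker with an inner search, emit that block by cons, and recurse from the marker; the tail block is the recursion's base case.
import Mathlib
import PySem

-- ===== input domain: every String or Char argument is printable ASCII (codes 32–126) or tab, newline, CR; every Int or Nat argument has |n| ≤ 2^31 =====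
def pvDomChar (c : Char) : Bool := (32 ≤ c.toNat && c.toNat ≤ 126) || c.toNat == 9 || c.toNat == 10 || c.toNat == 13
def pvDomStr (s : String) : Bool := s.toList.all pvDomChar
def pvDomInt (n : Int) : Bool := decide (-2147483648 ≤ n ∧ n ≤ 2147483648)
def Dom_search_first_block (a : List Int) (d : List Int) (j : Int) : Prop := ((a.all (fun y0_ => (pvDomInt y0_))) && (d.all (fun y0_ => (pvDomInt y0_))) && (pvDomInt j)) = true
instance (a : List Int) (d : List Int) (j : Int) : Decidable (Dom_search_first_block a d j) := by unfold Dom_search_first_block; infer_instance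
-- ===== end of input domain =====

-- B replaces A's single accumulator loop with a recursive per-block decomposition
-- (search for the next marker, emit the block, recurse); objective: alternative.

-- ===== PORT A =====
-- the loop body of A (indices r, i are always in range, so d[r] / d[r-1] are ported with pyGetD, exact here)
def sfbStepA (a : List Int) (d : List Int) (j : Int) (n : Int)
    (st : List (List Int × Int × Int) × Int) (r : Int) : List (List Int × Int × Int) × Int :=
  let st1 :=
    if PySem.List.pyGetD d r 0 == j && r != 1 && r != n - 1 then
      (st.1 ++ [(PySem.List.slice a (some st.2) (some r), PySem.List.pyGetD d (r - 1) 0, j)], r)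
    else st
  if r == n - 1 then
    (st1.1 ++ [(PySem.List.slice a (some st1.2) (some (r + 1)), PySem.List.pyGetD d (r - 1) 0, j)], st1.2)
  else st1

def search_first_block (a : List Int) (d : List Int) (j : Int) : List (List Int × Int × Int) :=
  let n : Int := d.length
  ((PySem.List.pyRange 1 n 1).foldl (sfbStepA a d j n) ([], 0)).1

-- ===== PORT B =====
-- go's 'for … if … return' is the first-match search over the range: List.find?
def sfbGo (a : List Int) (d : List Int) (j : Int) (n : Int) (i : Int) : List (List Int × Int × Int) :=
  match h : (PySem.List.pyRange (max (i + 1) 2) (n - 1) 1).find? (fun r => PySem.List.pyGetD d r 0 == j) with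
  | some r =>
      (PySem.List.slice a (some i) (some r), PySem.List.pyGetD d (r - 1) 0, j) :: sfbGo a d j n r
  | none => [(PySem.List.slice a (some i) (some n), PySem.List.pyGetD d (n - 2) 0, j)]
termination_by (n - i).toNat
decreasing_by
  have hm := PySem.List.mem_pyRange_one.1 (List.mem_of_find?_eq_some h)
  omega

def search_first_block_alt (a : List Int) (d : List Int) (j : Int) : List (List Int × Int × Int) :=
  let n : Int := d.length
  if n < 2 then [] else sfbGo a d j n 0

-- ===== PRECONDITION & SPEC =====
def Spec_search_first_block (a : List Int) (d : List Int) (j : Int) (out : List (List Int × Int × Int)) : Prop := out = search_first_block_alt a d j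
instance (a : List Int) (d : List Int) (j : Int) (out : List (List Int × Int × Int)) : Decidable (Spec_search_first_block a d j out) := by unfold Spec_search_first_block; infer_instance

-- ===== CLAIM (what is proved, stated in full; the proofs are below) =====
def Claim_equal_search_first_block : Prop := ∀ (a : List Int) (d : List Int) (j : Int), Dom_search_first_block a d j → Spec_search_first_block a d j (search_first_block a d j)

-- ===== LEMMAS AND PROOFS =====

-- A's fold over the suffix pyRange r n, in a state (acc, i) whose skipped indices
-- [max(i+1,2), r) all fail the marker test, equals acc ++ sfbGo i.
theorem pv_fold_eq_go (a d : List Int) (j n : Int) :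
    ∀ (m : Nat) (r i : Int) (acc : List (List Int × Int × Int)),
      (n - r).toNat = m → 2 ≤ r → r ≤ n - 1 → 0 ≤ i → i < r →
      (∀ x, max (i + 1) 2 ≤ x → x < r → ¬ (PySem.List.pyGetD d x 0 == j) = true) →
      ((PySem.List.pyRange r n 1).foldl (sfbStepA a d j n) (acc, i)).1
      = acc ++ sfbGo a d j n i := by
  intro m
  induction m using Nat.strong_induction_on with
  | _ m ih =>
    intro r i acc hm h2 hr hi hir hskip
    by_cases hlast : r = n - 1
    · -- final index: only the tail append fires; B's search range is all skipped
      subst hlast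
      have hnone : (PySem.List.pyRange (max (i + 1) 2) (n - 1) 1).find?
          (fun r => PySem.List.pyGetD d r 0 == j) = none := by
        rw [List.find?_eq_none]
        intro x hx
        have := PySem.List.mem_pyRange_one.1 hx
        exact hskip x this.1 this.2
      rw [PySem.List.pyRange_one_cons (by omega : n - 1 < n),
          PySem.List.pyRange_one_eq_nil (by omega : n ≤ n - 1 + 1)]
      rw [sfbGo, hnone]
      have hc1 : (PySem.List.pyGetD d (n-1) 0 == j && (n-1) != 1 && (n-1) != n - 1) = false := by simp
      have hc2 : ((n : Int) - 1 == n - 1) = true := by simp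
      simp only [List.foldl_cons, List.foldl_nil, sfbStepA, hc1, hc2, Bool.false_eq_true,
        if_false, if_true]
      have e1 : n - 1 + 1 = n := by omega
      have e2 : n - 1 - 1 = n - 2 := by omega
      rw [e1, e2]
    · have hrn : r < n - 1 := by omega
      rw [PySem.List.pyRange_one_cons (by omega : r < n), List.foldl_cons]
      have hne1 : (r != 1) = true := by simp; omega
      have hnen : (r != n - 1) = true := by simp; omega
      have hno : (r == n - 1) = false := by simp; omega
      by_cases hp : (PySem.List.pyGetD d r 0 == j) = true
      · -- marker found at r: B's find? returns r, both emit the block and continue from r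
        have hmaxle : max (i + 1) 2 ≤ r := by omega
        have hsome : (PySem.List.pyRange (max (i + 1) 2) (n - 1) 1).find?
            (fun r => PySem.List.pyGetD d r 0 == j) = some r := by
          rw [PySem.List.pyRange_one_append (max (i + 1) 2) r (n - 1) hmaxle (by omega),
              List.find?_append]
          have h1 : (PySem.List.pyRange (max (i + 1) 2) r 1).find?
              (fun r => PySem.List.pyGetD d r 0 == j) = none := by
            rw [List.find?_eq_none]
            intro x hx
            have := PySem.List.mem_pyRange_one.1 hx
            exact hskip x this.1 this.2
          rw [h1, PySem.List.pyRange_one_cons (by omega : r < n - 1)]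
          simp [hp]
        rw [sfbGo, hsome]
        simp only [sfbStepA, hp, hne1, hnen, hno, Bool.and_self, if_true, Bool.false_eq_true,
          if_false]
        rw [ih (n - (r+1)).toNat (by omega) (r+1) r
            (acc ++ [(PySem.List.slice a (some i) (some r), PySem.List.pyGetD d (r - 1) 0, j)])
            rfl (by omega) (by omega) (by omega) (by omega)
            (by intro x hx1 hx2; omega)]
        simp
      · -- no marker at r: state unchanged, extend the skipped interval
        simp only [sfbStepA, hp, hno, Bool.false_and, Bool.false_eq_true, if_false]
        exact ih (n - (r+1)).toNat (by omega) (r+1) i acc rfl (by omega) (by omega) hi (by omega)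
          (by
            intro x hx1 hx2
            by_cases hxr : x = r
            · subst hxr; exact hp
            · exact hskip x hx1 (by omega))

theorem search_first_block_spec : Claim_equal_search_first_block := by
  intro a d j _
  unfold Spec_search_first_block search_first_block search_first_block_alt
  show ((PySem.List.pyRange 1 (d.length : Int) 1).foldl (sfbStepA a d j (d.length : Int)) ([], 0)).1
      = if (d.length : Int) < 2 then [] else sfbGo a d j (d.length : Int) 0
  set n : Int := (d.length : Int) with hn
  have h0 : 0 ≤ n := by simp [hn]
  by_cases h2 : n < 2
  · rw [PySem.List.pyRange_one_eq_nil (by omega), if_pos h2]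
    rfl
  · rw [if_neg h2]
    by_cases h3 : n = 2
    · -- n = 2: A's sole iteration r = 1 appends the tail; B's search range is empty
      rw [h3]
      rw [PySem.List.pyRange_one_cons (by norm_num : (1:Int) < 2),
          PySem.List.pyRange_one_eq_nil (by norm_num : (2:Int) ≤ 1 + 1)]
      rw [sfbGo, List.find?_eq_none.2 (by
        intro x hx
        have := PySem.List.mem_pyRange_one.1 hx
        omega)]
      have hc1 : (PySem.List.pyGetD d 1 0 == j && (1:Int) != 1 && (1:Int) != 2 - 1) = false := by
        simp
      have hc2 : ((1 : Int) == 2 - 1) = true := by norm_num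
      simp only [List.foldl_cons, List.foldl_nil, sfbStepA, hc1, hc2, Bool.false_eq_true,
        if_false, if_true]
      norm_num
    · -- n ≥ 3: A's first iteration r = 1 is a no-op, then the suffix lemma applies at r = 2
      rw [PySem.List.pyRange_one_cons (by omega : (1:Int) < n), List.foldl_cons]
      have hc1 : (PySem.List.pyGetD d 1 0 == j && (1:Int) != 1 && (1:Int) != n - 1) = false := by
        simp
      have hc2 : ((1 : Int) == n - 1) = false := by simp; omega
      simp only [sfbStepA, hc1, hc2, Bool.false_eq_true, if_false]
      have e : (1 : Int) + 1 = 2 := by norm_num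
      rw [e, pv_fold_eq_go a d j n (n - 2).toNat 2 0 [] rfl (by omega) (by omega) (by omega)
          (by omega) (by intro x hx1 hx2; omega)]
      simp

-- ===== VERDICT (by name: the statement is the Claim_ definition above) =====
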